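-- pv_equiv track=rewrite | github.com/2tbmz9y2xt-lang/rubin-protocol | tools/check_no_remote_shell_bootstrap.py | inline_plain_scalar_entries
-- ===== SOURCE A (Python) =====
-- def inline_plain_scalar_entries(
--     step_entries: list[tuple[int, str]],
--     first_line_no: int,
--     first_content: str,
--     run_indent: int,
-- ) -> list[tuple[int, str]]:
--     entries: list[tuple[int, str]] = [(first_line_no, first_content)]
--     base_indent: int | None = None
--     for line_no, raw in step_entries[1:]:
--         if not raw.strip():
--             if base_indent is not None:
--                 entries.append((line_no, ""))
--             continue
--         indent = len(raw) - len(raw.lstrip())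
--         if indent <= run_indent:
--             break
--         continuation_indent = run_indent + 1
--         if base_indent is None:
--             base_indent = continuation_indent
--         entries.append((line_no, raw[continuation_indent:]))
--     return entries
-- ===== SOURCE B (Python) =====
-- def inline_plain_scalar_entries(
--     step_entries: list[tuple[int, str]],
--     first_line_no: int,
--     first_content: str,
--     run_indent: int,
-- ) -> list[tuple[int, str]]:
--     def blank(raw: str) -> bool:
--         return not raw.strip()
--
--     def continues(raw: str) -> bool:
--         return blank(raw) or len(raw) - len(raw.lstrip()) > run_indent
--
--     # the continuation block: entries up to the first non-blank line at or below run_indent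
--     rest = step_entries[1:]
--     block: list[tuple[int, str]] = []
--     for entry in rest:
--         if not continues(entry[1]):
--             break
--         block.append(entry)
--     # leading blank lines (before any real continuation content) are discarded
--     while block and blank(block[0][1]):
--         block.pop(0)
--     return [(first_line_no, first_content)] + [
--         (line_no, "" if blank(raw) else raw[run_indent + 1:]) for line_no, raw in block
--     ]
-- ===== Notes on version B (the rewrite author's own statement) =====
-- stated objective: simpler
-- what changed: Replaces A's single stateful loop (base_indent flag, conditional blank appends, mid-loop break) by a three-stage pipeline: take the continuation block (blank or deeper-indented lines), drop its leading blanks, then map each line to its inlined form.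
import Mathlib
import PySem

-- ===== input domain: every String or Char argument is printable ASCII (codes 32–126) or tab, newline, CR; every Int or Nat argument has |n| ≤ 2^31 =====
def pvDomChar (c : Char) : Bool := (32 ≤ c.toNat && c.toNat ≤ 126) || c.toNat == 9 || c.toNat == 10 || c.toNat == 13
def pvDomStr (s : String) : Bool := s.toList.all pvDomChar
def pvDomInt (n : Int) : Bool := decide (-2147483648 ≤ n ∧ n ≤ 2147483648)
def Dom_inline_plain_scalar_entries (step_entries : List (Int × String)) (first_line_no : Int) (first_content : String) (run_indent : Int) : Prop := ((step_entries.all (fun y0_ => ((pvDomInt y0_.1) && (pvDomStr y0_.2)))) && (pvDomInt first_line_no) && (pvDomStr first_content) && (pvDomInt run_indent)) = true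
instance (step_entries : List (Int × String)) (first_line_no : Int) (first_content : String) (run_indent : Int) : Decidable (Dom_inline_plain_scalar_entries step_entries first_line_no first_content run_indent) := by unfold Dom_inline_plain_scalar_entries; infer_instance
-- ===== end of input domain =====

-- B replaces A's stateful loop by a takeWhile/dropWhile/map pipeline (objective: simpler).


-- ===== PORT A =====
-- A's loop: walks the remaining entries carrying the accumulated list and base_indent;
-- 'break' is modelled by returning the accumulator.
def pvALoop (run_indent : Int) : List (Int × String) → List (Int × String) → Option Int → List (Int × String)
  | [], entries, _ => entries
  | (line_no, raw) :: rest, entries, base_indent =>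
    if PySem.Str.strip raw = "" then
      match base_indent with
      | some _ => pvALoop run_indent rest (entries ++ [(line_no, "")]) base_indent
      | none => pvALoop run_indent rest entries base_indent
    else
      let indent : Int := PySem.Str.len raw - PySem.Str.len (PySem.Str.lstrip raw)
      if indent ≤ run_indent then entries
      else
        let continuation_indent := run_indent + 1
        let base_indent' := match base_indent with
          | none => some continuation_indent
          | some b => some b
        pvALoop run_indent rest (entries ++ [(line_no, PySem.Str.slice raw (some continuation_indent) none)]) base_indent'

def inline_plain_scalar_entries (step_entries : List (Int × String)) (first_line_no : Int) (first_content : String) (run_indent : Int) : List (Int × String) :=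
  pvALoop run_indent (PySem.List.slice step_entries (some 1) none) [(first_line_no, first_content)] none

-- ===== PORT B =====
-- Source B's helpers: blank line test, continuation test, and the inlining map.
def pvBlank (raw : String) : Bool := PySem.Str.strip raw = ""
def pvContinues (run_indent : Int) (raw : String) : Bool :=
  pvBlank raw || decide (PySem.Str.len raw - PySem.Str.len (PySem.Str.lstrip raw) > run_indent)
def pvInline (run_indent : Int) (e : Int × String) : Int × String :=
  (e.1, if pvBlank e.2 then "" else PySem.Str.slice e.2 (some (run_indent + 1)) none)

def inline_plain_scalar_entries_alt (step_entries : List (Int × String)) (first_line_no : Int) (first_content : String) (run_indent : Int) : List (Int × String) :=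
  let rest := PySem.List.slice step_entries (some 1) none
  let block := rest.takeWhile (fun e => pvContinues run_indent e.2)
  let block := block.dropWhile (fun e => pvBlank e.2)
  (first_line_no, first_content) :: block.map (pvInline run_indent)

-- ===== PRECONDITION & SPEC =====
def Spec_inline_plain_scalar_entries (step_entries : List (Int × String)) (first_line_no : Int) (first_content : String) (run_indent : Int) (out : List (Int × String)) : Prop := out = inline_plain_scalar_entries_alt step_entries first_line_no first_content run_indent
instance (step_entries : List (Int × String)) (first_line_no : Int) (first_content : String) (run_indent : Int) (out : List (Int × String)) : Decidable (Spec_inline_plain_scalar_entries step_entries first_line_no first_content run_indent out) := by unfold Spec_inline_plain_scalar_entries; infer_instance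

-- ===== CLAIM (what is proved, stated in full; the proofs are below) =====
def Claim_equal_inline_plain_scalar_entries : Prop := ∀ (step_entries : List (Int × String)) (first_line_no : Int) (first_content : String) (run_indent : Int), Dom_inline_plain_scalar_entries step_entries first_line_no first_content run_indent → Spec_inline_plain_scalar_entries step_entries first_line_no first_content run_indent (inline_plain_scalar_entries step_entries first_line_no first_content run_indent)

-- ===== LEMMAS AND PROOFS =====
lemma pvALoop_eq (run_indent : Int) (t acc : List (Int × String)) (b : Option Int) :
    pvALoop run_indent t acc b = acc ++ (match b with
      | none => ((t.takeWhile (fun e => pvContinues run_indent e.2)).dropWhile (fun e => pvBlank e.2)).map (pvInline run_indent)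
      | some _ => (t.takeWhile (fun e => pvContinues run_indent e.2)).map (pvInline run_indent)) := by
  induction t generalizing acc b with
  | nil => cases b <;> simp [pvALoop]
  | cons hd t ih =>
    obtain ⟨ln, raw⟩ := hd
    by_cases hb : PySem.Str.strip raw = ""
    · cases b with
      | none =>
        simp [pvALoop, hb, ih, List.takeWhile, pvContinues, pvBlank]
      | some v =>
        simp [pvALoop, hb, ih, List.takeWhile, pvContinues, pvBlank, pvInline]
    · by_cases hi : ((raw.length : Int) - ((PySem.Chars.lstrip raw.toList).length : Int) ≤ run_indent)
      · have hc : pvContinues run_indent raw = false := by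
          simp [pvContinues, pvBlank, hb]; omega
        cases b <;> (simp [pvALoop, hb, List.takeWhile, hc, PySem.Str.len]; intro h; omega)
      · have hc : pvContinues run_indent raw = true := by
          simp [pvContinues, pvBlank]; omega
        have hbl : pvBlank raw = false := by simp [pvBlank, hb]
        cases b <;>
          simp [pvALoop, hb, hi, ih, List.takeWhile, hc, hbl, pvInline, PySem.Str.len]

-- ===== VERDICT (by name: the statement is the Claim_ definition above) =====
theorem inline_plain_scalar_entries_spec : Claim_equal_inline_plain_scalar_entries := by
  intro se fl fc ri _
  unfold Spec_inline_plain_scalar_entries inline_plain_scalar_entries inline_plain_scalar_entries_alt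
  simp [pvALoop_eq]
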